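-- pv_equiv track=rewrite | github.com/eddabbah/flaskmeteo | getData.py | getImagescloud
-- ===== SOURCE A (Python) =====
-- def getImagescloud(L):
--    listImages=[]
--    for t in L:
--       if t<20:
--          listImages.append("sun.jpg")
--       elif t<40:
--          listImages.append("sunlowcloud.jpg")
--       elif t<60:
--          listImages.append("sunmorecloud.jpg")
--       else :
--          listImages.append("cloud.jpg")
--    return listImages
-- ===== SOURCE B (Python) =====
-- def getImagescloud(L):
--     thresholds = [20, 40, 60]
--     labels = ["sun.jpg", "sunlowcloud.jpg", "sunmorecloud.jpg", "cloud.jpg"]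
--
--     def idx(t):
--         # binary search: number of thresholds <= t (bisect_right by hand)
--         lo, hi = 0, len(thresholds)
--         while lo < hi:
--             mid = (lo + hi) // 2
--             if t < thresholds[mid]:
--                 hi = mid
--             else:
--                 lo = mid + 1
--         return lo
--
--     return [labels[idx(t)] for t in L]
-- ===== Notes on version B (the rewrite author's own statement) =====
-- stated objective: idiomatic
-- what changed: Replaces the if/elif cutoff cascade with a threshold table and a binary search (hand-written bisect_right) indexing into a label table, built as a list comprehension.
import Mathlib
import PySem

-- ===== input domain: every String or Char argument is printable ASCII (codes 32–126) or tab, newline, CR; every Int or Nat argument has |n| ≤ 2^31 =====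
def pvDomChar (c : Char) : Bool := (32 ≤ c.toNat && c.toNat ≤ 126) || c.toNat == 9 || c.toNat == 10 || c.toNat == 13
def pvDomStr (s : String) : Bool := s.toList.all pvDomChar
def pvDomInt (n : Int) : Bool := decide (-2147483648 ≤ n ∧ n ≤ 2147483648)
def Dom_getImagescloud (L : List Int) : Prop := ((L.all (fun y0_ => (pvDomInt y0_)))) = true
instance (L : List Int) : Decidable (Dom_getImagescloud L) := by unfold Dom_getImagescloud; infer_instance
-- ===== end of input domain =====

-- B replaces A's if/elif cascade with a binary search over a threshold table; same values, idiomatic restructure.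
-- ===== PORT A =====
def getImagescloud (L : List Int) : List String :=
  L.foldl (fun listImages t =>
    if t < 20 then listImages ++ ["sun.jpg"]
    else if t < 40 then listImages ++ ["sunlowcloud.jpg"]
    else if t < 60 then listImages ++ ["sunmorecloud.jpg"]
    else listImages ++ ["cloud.jpg"]) []

-- ===== PORT B =====
-- hand-written bisect_right loop from Source B (while lo < hi)
def pvBisect (thr : List Int) (t : Int) (lo hi : Nat) : Nat :=
  if lo < hi then
    let mid := (lo + hi) / 2
    if t < thr.getD mid 0 then pvBisect thr t lo mid
    else pvBisect thr t (mid + 1) hi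
  else lo
termination_by hi - lo
decreasing_by all_goals omega

def getImagescloud_alt (L : List Int) : List String :=
  let thresholds : List Int := [20, 40, 60]
  let labels := ["sun.jpg", "sunlowcloud.jpg", "sunmorecloud.jpg", "cloud.jpg"]
  L.map (fun t => labels.getD (pvBisect thresholds t 0 thresholds.length) "")

-- ===== PRECONDITION & SPEC =====
def Spec_getImagescloud (L : List Int) (out : List String) : Prop := out = getImagescloud_alt L
instance (L : List Int) (out : List String) : Decidable (Spec_getImagescloud L out) := by unfold Spec_getImagescloud; infer_instance

-- ===== CLAIM (what is proved, stated in full; the proofs are below) =====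
def Claim_equal_getImagescloud : Prop := ∀ (L : List Int), Dom_getImagescloud L → Spec_getImagescloud L (getImagescloud L)

-- ===== LEMMAS AND PROOFS =====

-- ===== VERDICT (by name: the statement is the Claim_ definition above) =====
lemma pvBisect_elem (t : Int) :
    (["sun.jpg", "sunlowcloud.jpg", "sunmorecloud.jpg", "cloud.jpg"] : List String).getD
      (pvBisect [20, 40, 60] t 0 3) ""
    = (if t < 20 then "sun.jpg" else if t < 40 then "sunlowcloud.jpg"
       else if t < 60 then "sunmorecloud.jpg" else "cloud.jpg") := by
  by_cases h40 : t < 40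
  · by_cases h20 : t < 20
    · simp [pvBisect, h20, h40]
    · simp [pvBisect, h20, h40]
  · by_cases h60 : t < 60
    · have h20 : ¬ t < 20 := by omega
      simp [pvBisect, h20, h40, h60]
    · have h20 : ¬ t < 20 := by omega
      simp [pvBisect, h20, h40, h60]

lemma getImagescloud_acc (L : List Int) (acc : List String) :
    L.foldl (fun listImages t =>
      if t < 20 then listImages ++ ["sun.jpg"]
      else if t < 40 then listImages ++ ["sunlowcloud.jpg"]
      else if t < 60 then listImages ++ ["sunmorecloud.jpg"]
      else listImages ++ ["cloud.jpg"]) acc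
    = acc ++ L.map (fun t =>
        if t < 20 then "sun.jpg" else if t < 40 then "sunlowcloud.jpg"
        else if t < 60 then "sunmorecloud.jpg" else "cloud.jpg") := by
  induction L generalizing acc with
  | nil => simp
  | cons t rest ih =>
    simp only [List.foldl, List.map]
    split_ifs <;> simp [ih]

theorem getImagescloud_spec : Claim_equal_getImagescloud := by
  intro L _
  unfold Spec_getImagescloud getImagescloud getImagescloud_alt
  rw [getImagescloud_acc]
  simp only [List.nil_append, List.length_cons, List.length_nil]
  exact List.map_congr_left (fun t _ => (pvBisect_elem t).symm)
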